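-- pv_equiv track=rewrite | github.com/johnpradford/Photo-ID-tool | metadata.py | extract_time_from_col_ac
-- ===== SOURCE A (Python) =====
-- def extract_time_from_col_ac(col_ac: str) -> str:
--     """Extract H:MM time from a Column AC identifier string.
--
--     col_ac format: {site}_{file}_{noext}_{YYYY.MM.DD}_{HHMM}_{seq}{ext}
--     Example: 2-1_SYPR0015.JPG_SYPR0015_2025.08.16_0227_1.jpg -> '2:27'
--     """
--     if not col_ac:
--         return ""
--     try:
--         parts = col_ac.split("_")
--         for i, part in enumerate(parts):
--             if len(part) == 10 and part[4] == "." and part[7] == ".":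
--                 if i + 1 < len(parts):
--                     hhmm = parts[i + 1]
--                     if len(hhmm) == 4 and hhmm.isdigit():
--                         h = int(hhmm[:2])
--                         m = int(hhmm[2:])
--                         if 0 <= h <= 23 and 0 <= m <= 59:
--                             return f"{h}:{m:02d}"
--     except (ValueError, IndexError):
--         pass
--     return ""
-- ===== SOURCE B (Python) =====
-- def extract_time_from_col_ac(col_ac: str) -> str:
--     """Extract H:MM time by sliding a 17-char window over the underscore-padded string.
--
--     A date part of length 10 with dots at offsets 4 and 7, followed by a
--     4-digit time part, appears in the underscore-padded string exactly as a
--     17-char window delimited by underscores at offsets 0, 11 and 16 (none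
--     inside the date body), so a raw character-level scan replaces splitting
--     into parts entirely.
--     """
--     s = "_" + col_ac + "_"
--     i = 0
--     while i + 17 <= len(s):
--         w = s[i:i + 17]
--         if (w[0] == "_" and w[11] == "_" and w[16] == "_"
--                 and "_" not in w[1:11] and w[5] == "." and w[8] == "."
--                 and w[12:16].isdigit()):
--             h = int(w[12:14])
--             m = int(w[14:16])
--             if 0 <= h <= 23 and 0 <= m <= 59:
--                 return f"{h}:{m:02d}"
--         i += 1
--     return ""
-- ===== Notes on version B (the rewrite author's own statement) =====
-- stated objective: alternative
-- what changed: A splits the identifier on underscores and loop-scans the resulting parts list with an index lookahead; B never splits: it pads the string with an underscore at each end and slides a fixed 17-character window over the raw characters, recognising the underscore-delimited date-plus-time shape directly.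
import Mathlib
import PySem

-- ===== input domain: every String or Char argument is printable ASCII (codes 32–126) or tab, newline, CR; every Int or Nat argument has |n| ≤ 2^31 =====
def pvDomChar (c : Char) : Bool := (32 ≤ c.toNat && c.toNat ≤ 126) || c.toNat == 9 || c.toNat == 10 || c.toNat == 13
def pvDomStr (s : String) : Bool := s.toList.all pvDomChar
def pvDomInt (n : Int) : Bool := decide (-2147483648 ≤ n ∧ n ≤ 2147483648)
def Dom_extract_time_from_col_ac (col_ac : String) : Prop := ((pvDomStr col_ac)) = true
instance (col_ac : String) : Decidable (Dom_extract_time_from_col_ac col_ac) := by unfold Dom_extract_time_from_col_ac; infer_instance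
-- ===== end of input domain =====

-- A splits the identifier on underscores and loop-scans the parts with an index lookahead;
-- B never splits: it pads the string with an underscore at each end and slides a fixed 17-char
-- window over the raw characters, recognising the underscore-delimited date-plus-time shape
-- directly (alternative algorithm, same asymptotic cost).

-- ===== PORT A =====
-- A's for-loop over enumerate(parts) with early return; indexes parts[i+1] via pyGet?.
-- Note: int(hhmm[:2]) / int(hhmm[2:]) cannot raise here — hhmm.isdigit() with ASCII input
-- guarantees ofChars? succeeds — so A's except path is unreachable and `.getD 0` is exact.
def pvLoopA (parts : List (List Char)) : List (Int × List Char) → String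
  | [] => ""
  | (i, part) :: rest =>
    if part.length = 10 ∧ PySem.List.pyGet? part 4 = some '.' ∧ PySem.List.pyGet? part 7 = some '.' then
      if i + 1 < (parts.length : Int) then
        let hhmm := (PySem.List.pyGet? parts (i + 1)).getD []
        if hhmm.length = 4 ∧ PySem.Chars.strIsdigit hhmm = true then
          let h := (PySem.Int.ofChars? (PySem.List.slice hhmm none (some 2))).getD 0
          let m := (PySem.Int.ofChars? (PySem.List.slice hhmm (some 2) none)).getD 0
          if 0 ≤ h ∧ h ≤ 23 ∧ 0 ≤ m ∧ m ≤ 59 then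
            String.ofList (PySem.Int.toChars h ++ ':' :: PySem.Chars.zfill (PySem.Int.toChars m) 2)
          else pvLoopA parts rest
        else pvLoopA parts rest
      else pvLoopA parts rest
    else pvLoopA parts rest

def extract_time_from_col_ac (col_ac : String) : String :=
  if col_ac == "" then ""
  else
    let parts := PySem.Chars.splitOn col_ac.toList ['_']
    pvLoopA parts (PySem.List.enumerate parts 0)

-- ===== PORT B =====
-- Source B's window test on w = s[i:i+17]; '"_" not in w[1:11]' is single-character substring
-- search, i.e. character membership in the slice (exact).
def pvWinOk (w : List Char) : Bool :=
  (PySem.List.pyGet? w 0 == some '_') && (PySem.List.pyGet? w 11 == some '_')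
  && (PySem.List.pyGet? w 16 == some '_')
  && !(PySem.List.slice w (some 1) (some 11)).contains '_'
  && (PySem.List.pyGet? w 5 == some '.') && (PySem.List.pyGet? w 8 == some '.')
  && PySem.Chars.strIsdigit (PySem.List.slice w (some 12) (some 16))

-- Source B's 'while i + 17 <= len(s)' index loop, ported as structural recursion on the
-- i-th suffix of s: the loop condition is 'current suffix has ≥ 17 chars' and
-- w = s[i:i+17] is 'take 17' of that suffix (exact).
def pvScanB (s : List Char) : String :=
  if s.length < 17 then ""
  else
    let w := s.take 17
    if pvWinOk w then
      let h := (PySem.Int.ofChars? (PySem.List.slice w (some 12) (some 14))).getD 0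
      let m := (PySem.Int.ofChars? (PySem.List.slice w (some 14) (some 16))).getD 0
      if 0 ≤ h ∧ h ≤ 23 ∧ 0 ≤ m ∧ m ≤ 59 then
        String.ofList (PySem.Int.toChars h ++ ':' :: PySem.Chars.zfill (PySem.Int.toChars m) 2)
      else pvScanB s.tail
    else pvScanB s.tail
  termination_by s.length
  decreasing_by all_goals (simp [List.length_tail]; omega)

-- s = "_" + col_ac + "_" built on the character list (exact for string concatenation)
def extract_time_from_col_ac_alt (col_ac : String) : String :=
  pvScanB ('_' :: col_ac.toList ++ ['_'])

-- ===== PRECONDITION & SPEC =====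
def Spec_extract_time_from_col_ac (col_ac : String) (out : String) : Prop := out = extract_time_from_col_ac_alt col_ac
instance (col_ac : String) (out : String) : Decidable (Spec_extract_time_from_col_ac col_ac out) := by unfold Spec_extract_time_from_col_ac; infer_instance

-- ===== CLAIM (what is proved, stated in full; the proofs are below) =====
def Claim_equal_extract_time_from_col_ac : Prop := ∀ (col_ac : String), Dom_extract_time_from_col_ac col_ac → Spec_extract_time_from_col_ac col_ac (extract_time_from_col_ac col_ac)

-- ===== LEMMAS AND PROOFS =====

-- A's per-pair validity (date-shaped part followed by a valid 4-digit time part)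
def pvPairOk (d t : List Char) : Bool :=
  decide (d.length = 10) && (PySem.List.pyGet? d 4 == some '.') && (PySem.List.pyGet? d 7 == some '.')
  && decide (t.length = 4) && PySem.Chars.strIsdigit t
  && decide (0 ≤ (PySem.Int.ofChars? (PySem.List.slice t none (some 2))).getD 0
             ∧ (PySem.Int.ofChars? (PySem.List.slice t none (some 2))).getD 0 ≤ 23)
  && decide (0 ≤ (PySem.Int.ofChars? (PySem.List.slice t (some 2) none)).getD 0
             ∧ (PySem.Int.ofChars? (PySem.List.slice t (some 2) none)).getD 0 ≤ 59)

def pvFmtB (t : List Char) : String :=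
  String.ofList (PySem.Int.toChars ((PySem.Int.ofChars? (PySem.List.slice t none (some 2))).getD 0)
             ++ ':' :: PySem.Chars.zfill (PySem.Int.toChars ((PySem.Int.ofChars? (PySem.List.slice t (some 2) none)).getD 0)) 2)

-- first valid adjacent pair of a parts list (intermediate form A's loop reduces to)
def pvZipScan (l l' : List (List Char)) : String :=
  match (l.zip l').find? (fun p => pvPairOk p.1 p.2) with
  | some p => pvFmtB p.2
  | none => ""

lemma pvLoop_eq (parts : List (List Char)) :
    ∀ (l : List (List Char)) (n : Nat), parts.drop n = l →
      pvLoopA parts (PySem.List.enumerate l (n : Int)) = pvZipScan l (parts.drop (n + 1)) := by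
  intro l
  induction l with
  | nil => intro n _; simp [pvLoopA, pvZipScan, PySem.List.enumerate]
  | cons d rest ih =>
    intro n hdrop
    have hR : parts.drop (n + 1) = rest := by
      rw [List.drop_add_one_eq_tail_drop, hdrop]; rfl
    rw [PySem.List.enumerate_cons]
    cases rest with
    | nil =>
      have hlen : parts.length = n + 1 := by
        have h1 : parts.length - n = 1 := by
          have := congrArg List.length hdrop; simpa using this
        have h2 : n < parts.length := by
          by_contra h
          simp [List.drop_eq_nil_of_le (Nat.le_of_not_lt h)] at hdrop
        omega
      rw [hR]
      simp only [pvLoopA, pvZipScan, List.zip_nil_right, List.find?_nil]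
      have hnb : ¬ ((n : Int) + 1 < (parts.length : Int)) := by
        rw [hlen]; omega
      split_ifs with h1 <;> simp_all [pvLoopA, PySem.List.enumerate]
    | cons t rest2 =>
      have hR2 : parts.drop (n + 2) = rest2 := by
        rw [show n + 2 = (n+1) + 1 from rfl, List.drop_add_one_eq_tail_drop, hR]; rfl
      have hget : PySem.List.pyGet? parts ((n : Int) + 1) = some t := by
        have : ((n : Int) + 1) = ((n + 1 : Nat) : Int) := by omega
        rw [this]
        simp only [pysem]
        rw [← List.head?_drop, hR]
        rfl
      have hbound : (n : Int) + 1 < (parts.length : Int) := by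
        have : n + 1 < parts.length := by
          by_contra h
          simp [List.drop_eq_nil_of_le (Nat.le_of_not_lt h)] at hR
        omega
      have ihn1 : pvLoopA parts (PySem.List.enumerate (t :: rest2) ((n : Int) + 1)) =
          pvZipScan (t :: rest2) rest2 := by
        have : ((n : Int) + 1) = ((n + 1 : Nat) : Int) := by omega
        rw [this, ih (n+1) hR, hR2]
      have hzip : pvZipScan (d :: t :: rest2) (t :: rest2) =
          (if pvPairOk d t then pvFmtB t else pvZipScan (t :: rest2) rest2) := by
        simp only [pvZipScan, List.zip_cons_cons, List.find?_cons]
        by_cases hp : pvPairOk d t = true <;> simp [hp]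
      rw [hR, hzip]
      simp only [pvLoopA, hget, Option.getD_some]
      have hiff : pvPairOk d t = true ↔
          ((d.length = 10 ∧ PySem.List.pyGet? d 4 = some '.' ∧ PySem.List.pyGet? d 7 = some '.')
           ∧ (t.length = 4 ∧ PySem.Chars.strIsdigit t = true)
           ∧ (0 ≤ (PySem.Int.ofChars? (PySem.List.slice t none (some 2))).getD 0
              ∧ (PySem.Int.ofChars? (PySem.List.slice t none (some 2))).getD 0 ≤ 23
              ∧ 0 ≤ (PySem.Int.ofChars? (PySem.List.slice t (some 2) none)).getD 0
              ∧ (PySem.Int.ofChars? (PySem.List.slice t (some 2) none)).getD 0 ≤ 59)) := by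
        simp only [pvPairOk, Bool.and_eq_true, decide_eq_true_eq, beq_iff_eq]
        tauto
      by_cases h1 : (d.length = 10 ∧ PySem.List.pyGet? d 4 = some '.' ∧ PySem.List.pyGet? d 7 = some '.')
      · by_cases h2 : (t.length = 4 ∧ PySem.Chars.strIsdigit t = true)
        · by_cases h3 : (0 ≤ (PySem.Int.ofChars? (PySem.List.slice t none (some 2))).getD 0
              ∧ (PySem.Int.ofChars? (PySem.List.slice t none (some 2))).getD 0 ≤ 23
              ∧ 0 ≤ (PySem.Int.ofChars? (PySem.List.slice t (some 2) none)).getD 0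
              ∧ (PySem.Int.ofChars? (PySem.List.slice t (some 2) none)).getD 0 ≤ 59)
          · have hp : pvPairOk d t = true := hiff.mpr ⟨h1, h2, h3⟩
            rw [if_pos h1, if_pos hbound, if_pos h2, if_pos h3, if_pos hp]
            rfl
          · have hp : pvPairOk d t = false := by
              rcases Bool.eq_false_or_eq_true (pvPairOk d t) with h | h
              · exact absurd (hiff.mp h).2.2 h3
              · exact h
            rw [if_pos h1, if_pos hbound, if_pos h2, if_neg h3, if_neg (by simp [hp]), ihn1]
        · have hp : pvPairOk d t = false := by
            rcases Bool.eq_false_or_eq_true (pvPairOk d t) with h | h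
            · exact absurd (hiff.mp h).2.1 h2
            · exact h
          rw [if_pos h1, if_pos hbound, if_neg h2, if_neg (by simp [hp]), ihn1]
      · have hp : pvPairOk d t = false := by
          rcases Bool.eq_false_or_eq_true (pvPairOk d t) with h | h
          · exact absurd (hiff.mp h).1 h1
          · exact h
        rw [if_neg h1, if_neg (by simp [hp]), ihn1]

-- the structural shape part of pvPairOk (its first five conjuncts)
def pvShape (d t : List Char) : Bool :=
  decide (d.length = 10) && (PySem.List.pyGet? d 4 == some '.') && (PySem.List.pyGet? d 7 == some '.')
  && decide (t.length = 4) && PySem.Chars.strIsdigit t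

lemma pvPgTake (p : List Char) (i : Int) (k : Nat) (h0 : i.toNat = k) (h1 : 0 ≤ i) (h2 : k < 17) :
    PySem.List.pyGet? (p.take 17) i = p[k]? := by
  rw [PySem.List.pyGet?_of_nonneg (p.take 17) h1, h0]; exact List.getElem?_take_of_lt h2

-- the window test recognises exactly a date-shaped part followed by a 4-char slot
lemma pvWinOk_eq (d t R : List Char) (hd : '_' ∉ d) (ht : '_' ∉ t) :
    pvWinOk (('_' :: (d ++ '_' :: (t ++ '_' :: R))).take 17) = pvShape d t := by
  set X := t ++ '_' :: R with hX
  set p := '_' :: (d ++ '_' :: X) with hp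
  have e0 : PySem.List.pyGet? (p.take 17) 0 = p[0]? := pvPgTake p 0 0 rfl (by norm_num) (by norm_num)
  have e5 : PySem.List.pyGet? (p.take 17) 5 = p[5]? := pvPgTake p 5 5 rfl (by norm_num) (by norm_num)
  have e8 : PySem.List.pyGet? (p.take 17) 8 = p[8]? := pvPgTake p 8 8 rfl (by norm_num) (by norm_num)
  have e11 : PySem.List.pyGet? (p.take 17) 11 = p[11]? := pvPgTake p 11 11 rfl (by norm_num) (by norm_num)
  have e16 : PySem.List.pyGet? (p.take 17) 16 = p[16]? := pvPgTake p 16 16 rfl (by norm_num) (by norm_num)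
  have ed4 : PySem.List.pyGet? d 4 = d[4]? := by
    rw [PySem.List.pyGet?_of_nonneg d (by norm_num)]; rfl
  have ed7 : PySem.List.pyGet? d 7 = d[7]? := by
    rw [PySem.List.pyGet?_of_nonneg d (by norm_num)]; rfl
  have hsl111 : PySem.List.slice (p.take 17) (some 1) (some 11) = (d ++ '_' :: X).take 10 := by
    rw [PySem.List.slice_toNat (p.take 17) (a := 1) (b := 11) (by norm_num) (by norm_num)]
    show List.take 10 (List.drop 1 (p.take 17)) = _
    rw [List.drop_take]
    show List.take 10 (List.take 16 (d ++ '_' :: X)) = _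
    rw [List.take_take]
    norm_num
  have hsl1216 : PySem.List.slice (p.take 17) (some 12) (some 16) = ((d ++ '_' :: X).drop 11).take 4 := by
    rw [PySem.List.slice_toNat (p.take 17) (a := 12) (b := 16) (by norm_num) (by norm_num)]
    show List.take 4 (List.drop 12 (p.take 17)) = _
    rw [List.drop_take]
    show List.take 4 (List.take 5 ((d ++ '_' :: X).drop 11)) = _
    rw [List.take_take]
    norm_num
  rcases Nat.lt_trichotomy d.length 10 with hlt | heq | hgt
  · -- short date part: '_' lands inside w[1:11]
    have hmem : '_' ∈ (d ++ '_' :: X).take 10 := by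
      rw [List.take_append]
      rw [List.take_of_length_le (by omega)]
      have : 0 < 10 - d.length := by omega
      cases h10 : 10 - d.length with
      | zero => omega
      | succ j => simp
    have hcontains : ((d ++ '_' :: X).take 10).contains '_' = true := by simpa using hmem
    simp only [pvWinOk, hsl111, hcontains, Bool.not_true, Bool.and_false, Bool.false_and]
    simp [pvShape, Nat.ne_of_lt hlt]
  · -- date part has length 10
    have h11 : p[11]? = some '_' := by
      rw [show p[11]? = (d ++ '_' :: X)[10]? from rfl]
      rw [List.getElem?_append_right (by omega)]
      simp [heq]
    have h0 : p[0]? = some '_' := rfl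
    have h5 : p[5]? = d[4]? := by
      rw [show p[5]? = (d ++ '_' :: X)[4]? from rfl]
      rw [List.getElem?_append_left (by omega)]
    have h8 : p[8]? = d[7]? := by
      rw [show p[8]? = (d ++ '_' :: X)[7]? from rfl]
      rw [List.getElem?_append_left (by omega)]
    have hdrop11 : (d ++ '_' :: X).drop 11 = X := by
      rw [List.drop_append]
      simp [heq, List.drop_eq_nil_of_le (by omega : d.length ≤ 11)]
    have hslemma : PySem.List.slice (p.take 17) (some 12) (some 16) = X.take 4 := by
      rw [hsl1216, hdrop11]
    have hsl111d : PySem.List.slice (p.take 17) (some 1) (some 11) = d := by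
      rw [hsl111, List.take_append, List.take_of_length_le (by omega)]
      simp [heq]
    have hcont : (d.contains '_') = false := by simp [hd]
    have h16 : p[16]? = X[4]? := by
      rw [show p[16]? = (d ++ '_' :: X)[15]? from rfl]
      rw [List.getElem?_append_right (by omega)]
      simp [heq]
    rcases Nat.lt_trichotomy t.length 4 with htlt | hteq | htgt
    · -- short time part: '_' inside the 4-char digit window
      have hmem : '_' ∈ X.take 4 := by
        rw [hX, List.take_append, List.take_of_length_le (by omega)]
        cases h4 : 4 - t.length with
        | zero => omega
        | succ j => simp
      have hdig : PySem.Chars.strIsdigit (X.take 4) = false := by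
        rcases List.mem_iff_append.mp hmem with ⟨pre, post, hsplit⟩
        rw [hsplit]
        simp [PySem.Chars.strIsdigit, PySem.Chars.isdigit]
      simp only [pvWinOk, hslemma, hdig, Bool.and_false]
      simp [pvShape, Nat.ne_of_lt htlt]
    · -- time part has length 4
      have h16' : p[16]? = some '_' := by
        rw [h16, hX, List.getElem?_append_right (by omega)]
        simp [hteq]
      have htake : X.take 4 = t := by
        rw [hX, List.take_append, List.take_of_length_le (by omega)]
        simp [hteq]
      simp only [pvWinOk, pvShape, e0, e11, e16, e5, e8, h0, h11, h16', h5, h8, hsl111d, hcont,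
        hslemma, htake, heq, hteq, ed4, ed7]
      simp
    · -- long time part: no '_' at w[16]
      have h16' : p[16]? = t[4]? := by
        rw [h16, hX, List.getElem?_append_left (by omega)]
      have ht4 : t[4]? = some t[4] := List.getElem?_eq_getElem (by omega)
      have hne : (PySem.List.pyGet? (p.take 17) 16 == some '_') = false := by
        rw [e16, h16', ht4]
        simp
        intro hcontr
        exact ht (hcontr ▸ List.getElem_mem _)
      simp only [pvWinOk, hne, Bool.and_false, Bool.false_and]
      simp [pvShape, (Nat.ne_of_lt htgt).symm]
  · -- long date part: no '_' at w[11]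
    have h11 : p[11]? = d[10]? := by
      rw [show p[11]? = (d ++ '_' :: X)[10]? from rfl]
      rw [List.getElem?_append_left (by omega)]
    have hd10 : d[10]? = some d[10] := List.getElem?_eq_getElem (by omega)
    have hne : (PySem.List.pyGet? (p.take 17) 11 == some '_') = false := by
      rw [e11, h11, hd10]
      simp
      intro hcontr
      exact hd (hcontr ▸ List.getElem_mem _)
    simp only [pvWinOk, hne, Bool.and_false, Bool.false_and]
    simp [pvShape, (Nat.ne_of_lt hgt).symm]

lemma pvDrop11 (d : List Char) (X : List Char) (heq : d.length = 10) :
    (d ++ '_' :: X).drop 11 = X := by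
  rw [List.drop_append]
  simp [heq, List.drop_eq_nil_of_le (by omega : d.length ≤ 11)]

-- the hour/minute slices of a matching window are the time part's slices
lemma pvSliceH (d t R : List Char) (hd10 : d.length = 10) (ht4 : t.length = 4) :
    PySem.List.slice (('_' :: (d ++ '_' :: (t ++ '_' :: R))).take 17) (some 12) (some 14)
      = PySem.List.slice t none (some 2) := by
  set X := t ++ '_' :: R with hX
  set p := '_' :: (d ++ '_' :: X) with hp
  rw [PySem.List.slice_to t (b := 2) (by norm_num)]
  rw [PySem.List.slice_toNat (p.take 17) (a := 12) (b := 14) (by norm_num) (by norm_num)]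
  show List.take 2 (List.drop 12 (p.take 17)) = t.take 2
  rw [List.drop_take]
  show List.take 2 (List.take 5 ((d ++ '_' :: X).drop 11)) = t.take 2
  rw [List.take_take, pvDrop11 d X hd10]
  norm_num
  rw [hX, List.take_append]
  simp [ht4]

lemma pvSliceM (d t R : List Char) (hd10 : d.length = 10) (ht4 : t.length = 4) :
    PySem.List.slice (('_' :: (d ++ '_' :: (t ++ '_' :: R))).take 17) (some 14) (some 16)
      = PySem.List.slice t (some 2) none := by
  set X := t ++ '_' :: R with hX
  set p := '_' :: (d ++ '_' :: X) with hp
  rw [PySem.List.slice_from t (a := 2) (by norm_num)]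
  rw [PySem.List.slice_toNat (p.take 17) (a := 14) (b := 16) (by norm_num) (by norm_num)]
  show List.take 2 (List.drop 14 (p.take 17)) = t.drop 2
  rw [List.drop_take]
  show List.take 2 (List.take 3 ((d ++ '_' :: X).drop 13)) = t.drop 2
  rw [List.take_take]
  norm_num
  have h13 : (d ++ '_' :: X).drop 13 = X.drop 2 := by
    rw [List.drop_append]
    rw [List.drop_eq_nil_of_le (by omega : d.length ≤ 13), hd10]
    rfl
  have hX2 : X.drop 2 = t.drop 2 ++ '_' :: R := by
    rw [hX, List.drop_append]
    rw [show (2 - t.length) = 0 from by omega]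
    rfl
  have h2 : (t.drop 2).length = 2 := by simp [ht4]
  rw [h13, hX2, List.take_append]
  rw [List.take_of_length_le (by omega), h2]
  simp

lemma pvZipScan_cons (d t : List Char) (rest : List (List Char)) :
    pvZipScan (d :: t :: rest) (t :: rest)
      = if pvPairOk d t then pvFmtB t else pvZipScan (t :: rest) rest := by
  simp only [pvZipScan, List.zip_cons_cons, List.find?_cons]
  by_cases hp : pvPairOk d t = true <;> simp [hp]

lemma pvScanB_short (s : List Char) (h : s.length < 17) : pvScanB s = "" := by
  rw [pvScanB, if_pos h]

-- scanning skips windows that do not start at an underscore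
lemma pvScanB_skip (d r : List Char) (hd : '_' ∉ d) :
    pvScanB (d ++ '_' :: r) = pvScanB ('_' :: r) := by
  induction d with
  | nil => rfl
  | cons c d ih =>
    have hc : c ≠ '_' := fun h => hd (by simp [h])
    have hd' : '_' ∉ d := fun h => hd (List.mem_cons_of_mem _ h)
    rw [List.cons_append]
    by_cases hlen : (c :: (d ++ '_' :: r)).length < 17
    · rw [pvScanB_short _ hlen, pvScanB_short]
      simp at hlen ⊢
      omega
    · rw [pvScanB, if_neg hlen]
      have hw : pvWinOk ((c :: (d ++ '_' :: r)).take 17) = false := by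
        rw [show (c :: (d ++ '_' :: r)).take 17 = c :: (d ++ '_' :: r).take 16 from rfl]
        simp [pvWinOk, PySem.List.pyGet?_zero_cons, hc]
      simp only [hw, Bool.false_eq_true, if_false]
      exact ih hd'

lemma pvShape_spec (d t : List Char) :
    pvShape d t = true ↔
      (d.length = 10 ∧ PySem.List.pyGet? d 4 = some '.' ∧ PySem.List.pyGet? d 7 = some '.'
       ∧ t.length = 4 ∧ PySem.Chars.strIsdigit t = true) := by
  simp only [pvShape, Bool.and_eq_true, decide_eq_true_eq, beq_iff_eq]
  tauto

-- single-'_' split characterized structurally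
def pvSplit : List Char → List (List Char)
  | [] => [[]]
  | c :: cs => if c = '_' then [] :: pvSplit cs else (pvSplit cs).modifyHead (c :: ·)

lemma pvSplit_ne_nil (cs : List Char) : pvSplit cs ≠ [] := by
  induction cs with
  | nil => simp [pvSplit]
  | cons c cs ih =>
    simp only [pvSplit]
    split_ifs
    · simp
    · cases h : pvSplit cs with
      | nil => exact absurd h ih
      | cons q qs => simp [List.modifyHead]

-- splitOn's fuelled worker, reduced to the structural split
lemma pvGo_eq (l : List Char) : ∀ (fuel : Nat) (cur : List Char) (acc : List (List Char)),
    l.length ≤ fuel →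
    PySem.Chars.splitOn.go ['_'] fuel l cur acc
      = acc.reverse ++ (pvSplit l).modifyHead (cur.reverse ++ ·) := by
  induction l with
  | nil =>
    intro fuel cur acc _
    cases fuel <;> simp [PySem.Chars.splitOn.go, pvSplit]
  | cons c rest ih =>
    intro fuel cur acc hle
    cases fuel with
    | zero => simp at hle
    | succ k =>
      by_cases hc : c = '_'
      · subst hc
        have hpre : List.isPrefixOf ['_'] ('_' :: rest) = true := by simp [List.isPrefixOf]
        simp only [PySem.Chars.splitOn.go, hpre, if_pos]
        rw [show List.drop (List.length ['_']) ('_'::rest) = rest from rfl]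
        rw [ih k [] (cur.reverse :: acc) (by simpa using Nat.lt_succ_iff.mp (by simpa using hle))]
        simp [pvSplit]
        cases h : pvSplit rest <;> simp [List.modifyHead]
      · have hpre : List.isPrefixOf ['_'] (c :: rest) = false := by
          simp [List.isPrefixOf]
          exact fun h => hc h.symm
        simp only [PySem.Chars.splitOn.go, hpre]
        rw [if_neg (by simp)]
        rw [ih k (c :: cur) acc (by simpa using Nat.lt_succ_iff.mp (by simpa using hle))]
        simp only [pvSplit, if_neg hc]
        cases h : pvSplit rest <;> simp [List.modifyHead]

lemma pvSplitOn_eq (cs : List Char) : PySem.Chars.splitOn cs ['_'] = pvSplit cs := by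
  rw [PySem.Chars.splitOn, pvGo_eq cs (cs.length + 1) [] [] (by omega)]
  cases h : pvSplit cs <;> simp [List.modifyHead]

lemma pvSplit_no_us (cs : List Char) : ∀ p ∈ pvSplit cs, '_' ∉ p := by
  induction cs with
  | nil => simp [pvSplit]
  | cons c rest ih =>
    simp only [pvSplit]
    split_ifs with hc
    · intro p hp
      rcases List.mem_cons.mp hp with h | h
      · simp [h]
      · exact ih p h
    · intro p hp
      cases h : pvSplit rest with
      | nil => exact absurd h (pvSplit_ne_nil rest)
      | cons q qs =>
        rw [h, List.modifyHead] at hp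
        rcases List.mem_cons.mp hp with h2 | h2
        · subst h2
          intro hmem
          rcases List.mem_cons.mp hmem with h3 | h3
          · exact hc h3.symm
          · exact ih q (by rw [h]; exact List.mem_cons_self) h3
        · exact ih p (by rw [h]; exact List.mem_cons_of_mem q h2)

lemma pvSplit_intercalate (cs : List Char) : List.intercalate ['_'] (pvSplit cs) = cs := by
  induction cs with
  | nil => simp [pvSplit, List.intercalate]
  | cons c rest ih =>
    simp only [pvSplit]
    split_ifs with hc
    · subst hc
      cases h : pvSplit rest with
      | nil => exact absurd h (pvSplit_ne_nil rest)
      | cons q qs =>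
        rw [← ih, h]
        simp [List.intercalate]
    · cases h : pvSplit rest with
      | nil => exact absurd h (pvSplit_ne_nil rest)
      | cons q qs =>
        rw [← ih, h, List.modifyHead]
        cases qs <;> simp [List.intercalate]

-- main bridge: the char scan over the padded glued parts is the first-valid-pair scan
lemma pvScanB_glue : ∀ (ps : List (List Char)), (∀ p ∈ ps, '_' ∉ p) →
    pvScanB ('_' :: (List.intercalate ['_'] ps ++ ['_'])) = pvZipScan ps ps.tail := by
  intro ps
  induction ps with
  | nil => intro _; rw [pvScanB_short _ (by simp [List.intercalate])]; rfl
  | cons dp ps ih =>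
    intro hno
    have hd : '_' ∉ dp := hno _ List.mem_cons_self
    cases ps with
    | nil =>
      show pvScanB ('_' :: (List.intercalate ['_'] [dp] ++ ['_'])) = pvZipScan [dp] []
      rw [show List.intercalate ['_'] [dp] = dp from by simp [List.intercalate]]
      show pvScanB ('_' :: (dp ++ ['_'])) = ""
      by_cases hlen : ('_' :: (dp ++ ['_'])).length < 17
      · exact pvScanB_short _ hlen
      · have hdlen : 15 ≤ dp.length := by simp at hlen; omega
        rw [pvScanB, if_neg hlen]
        have h11 : PySem.List.pyGet? (('_' :: (dp ++ ['_'])).take 17) 11 = dp[10]? := by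
          rw [pvPgTake ('_' :: (dp ++ ['_'])) 11 11 rfl (by norm_num) (by norm_num)]
          rw [show ('_' :: (dp ++ ['_']))[11]? = (dp ++ ['_'])[10]? from rfl]
          rw [List.getElem?_append_left (by omega)]
        have h10 : dp[10]? = some dp[10] := List.getElem?_eq_getElem (by omega)
        have hne : dp[10] ≠ '_' := fun h => hd (h ▸ List.getElem_mem _)
        have hb : (PySem.List.pyGet? (('_' :: (dp ++ ['_'])).take 17) 11 == some '_') = false := by
          rw [h11, h10]; simp [hne]
        have hw : pvWinOk (('_' :: (dp ++ ['_'])).take 17) = false := by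
          simp only [pvWinOk, hb, Bool.and_false, Bool.false_and]
        simp only [hw, Bool.false_eq_true, if_false]
        show pvScanB (dp ++ '_' :: []) = ""
        rw [pvScanB_skip dp [] hd]
        exact pvScanB_short _ (by simp)
    | cons tp ps2 =>
      have ht : '_' ∉ tp := hno _ (List.mem_cons_of_mem _ List.mem_cons_self)
      have hno2 : ∀ p ∈ tp :: ps2, '_' ∉ p := fun p hp => hno p (List.mem_cons_of_mem _ hp)
      obtain ⟨R, hY⟩ : ∃ R, List.intercalate ['_'] (tp :: ps2) ++ ['_'] = tp ++ '_' :: R := by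
        cases ps2 with
        | nil => exact ⟨[], by simp [List.intercalate]⟩
        | cons q qs =>
          refine ⟨List.intercalate ['_'] (q :: qs) ++ ['_'], ?_⟩
          simp [List.intercalate]
      have hdecomp : List.intercalate ['_'] (dp :: tp :: ps2) ++ ['_']
          = dp ++ '_' :: (tp ++ '_' :: R) := by
        have hcc : List.intercalate ['_'] (dp :: tp :: ps2)
            = dp ++ ['_'] ++ List.intercalate ['_'] (tp :: ps2) := by simp [List.intercalate]
        rw [hcc, ← hY]
        simp
      rw [hdecomp, show (dp :: tp :: ps2).tail = tp :: ps2 from rfl, pvZipScan_cons]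
      by_cases hlen : ('_' :: (dp ++ '_' :: (tp ++ '_' :: R))).length < 17
      · rw [pvScanB_short _ hlen]
        have hpair : pvPairOk dp tp = false := by
          rcases Bool.eq_false_or_eq_true (pvPairOk dp tp) with h | h
          · exfalso
            have h10 : dp.length = 10 := by
              have := h; simp only [pvPairOk, Bool.and_eq_true, decide_eq_true_eq] at this; tauto
            have h4 : tp.length = 4 := by
              have := h; simp only [pvPairOk, Bool.and_eq_true, decide_eq_true_eq] at this; tauto
            simp [h10, h4] at hlen
            omega
          · exact h
        rw [if_neg (by simp [hpair])]
        have ih' := ih hno2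
        simp only [List.tail_cons] at ih'
        rw [← ih', hY]
        rw [pvScanB_short]
        simp at hlen ⊢
        omega
      · rw [pvScanB, if_neg hlen]
        simp only [pvWinOk_eq dp tp R hd ht]
        by_cases hs : pvShape dp tp = true
        · obtain ⟨h10, hdot4, hdot7, h4, hdig⟩ := (pvShape_spec dp tp).mp hs
          rw [hs]
          simp only [if_true, pvSliceH dp tp R h10 h4, pvSliceM dp tp R h10 h4]
          by_cases hr : (0 ≤ (PySem.Int.ofChars? (PySem.List.slice tp none (some 2))).getD 0
              ∧ (PySem.Int.ofChars? (PySem.List.slice tp none (some 2))).getD 0 ≤ 23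
              ∧ 0 ≤ (PySem.Int.ofChars? (PySem.List.slice tp (some 2) none)).getD 0
              ∧ (PySem.Int.ofChars? (PySem.List.slice tp (some 2) none)).getD 0 ≤ 59)
          · rw [if_pos hr]
            have hpair : pvPairOk dp tp = true := by
              simp only [pvPairOk, Bool.and_eq_true, decide_eq_true_eq, beq_iff_eq]
              refine ⟨⟨⟨⟨⟨⟨by simp [h10], by simp [hdot4]⟩, by simp [hdot7]⟩, by simp [h4]⟩, hdig⟩, ?_⟩, ?_⟩
              · exact ⟨hr.1, hr.2.1⟩
              · exact ⟨hr.2.2.1, hr.2.2.2⟩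
            rw [if_pos hpair]
            rfl
          · rw [if_neg hr]
            have hpair : pvPairOk dp tp = false := by
              rcases Bool.eq_false_or_eq_true (pvPairOk dp tp) with h | h
              · exfalso
                apply hr
                simp only [pvPairOk, Bool.and_eq_true, decide_eq_true_eq] at h
                tauto
              · exact h
            rw [if_neg (by simp [hpair])]
            show pvScanB (dp ++ '_' :: (tp ++ '_' :: R)) = _
            rw [pvScanB_skip _ _ hd, ← hY]
            have ih' := ih hno2
            simp only [List.tail_cons] at ih'
            exact ih'
        · have hsf : pvShape dp tp = false := by
            rcases Bool.eq_false_or_eq_true (pvShape dp tp) with h | h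
            · exact absurd h hs
            · exact h
          rw [hsf]
          have hpair : pvPairOk dp tp = false := by
            rcases Bool.eq_false_or_eq_true (pvPairOk dp tp) with h | h
            · exfalso
              apply hs
              simp only [pvPairOk, Bool.and_eq_true] at h
              simp only [pvShape, Bool.and_eq_true]
              tauto
            · exact h
          simp only [Bool.false_eq_true, if_false]
          rw [if_neg (by simp [hpair])]
          show pvScanB (dp ++ '_' :: (tp ++ '_' :: R)) = _
          rw [pvScanB_skip _ _ hd, ← hY]
          have ih' := ih hno2
          simp only [List.tail_cons] at ih'
          exact ih'


-- ===== VERDICT (by name: the statement is the Claim_ definition above) =====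
theorem extract_time_from_col_ac_spec : Claim_equal_extract_time_from_col_ac := by
  intro col_ac _
  show extract_time_from_col_ac col_ac = extract_time_from_col_ac_alt col_ac
  by_cases he : col_ac = ""
  · subst he; simp [extract_time_from_col_ac, extract_time_from_col_ac_alt, pvScanB]
  · have hbe : (col_ac == "") = false := by simp [he]
    rw [extract_time_from_col_ac, extract_time_from_col_ac_alt, hbe]
    simp only [Bool.false_eq_true, if_false]
    rw [pvSplitOn_eq]
    have h1 := pvLoop_eq (pvSplit col_ac.toList) (pvSplit col_ac.toList) 0 rfl
    simp only [Nat.cast_zero] at h1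
    rw [h1, List.drop_one]
    conv_rhs => rw [← pvSplit_intercalate col_ac.toList]
    exact (pvScanB_glue (pvSplit col_ac.toList) (pvSplit_no_us col_ac.toList)).symm
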